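-- pv_equiv track=rewrite | github.com/mlaws21/causal_proteins | query/query2.py | match_mut_location
-- ===== SOURCE A (Python) =====
-- def match_mut_location(new_muts, germline):
--
--     matches = set()
--     for nmut in new_muts:
--         nmut_loc = nmut[1:-1]
--
--         for i in germline:
--             germ_mut_loc = i[1:-1]
--             if nmut_loc == germ_mut_loc:
--                 matches.add(i)
--                 break
--     return matches
-- ===== SOURCE B (Python) =====
-- def match_mut_location(new_muts, germline):
--     first_by_loc = {}
--     for g in germline:
--         loc = g[1:-1]
--         if loc not in first_by_loc:
--             first_by_loc[loc] = g
--     matches = set()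
--     for nmut in new_muts:
--         g = first_by_loc.get(nmut[1:-1])
--         if g is not None:
--             matches.add(g)
--     return matches
-- ===== Notes on version B (the rewrite author's own statement) =====
-- stated objective: faster
-- what changed: B builds a dict mapping each location to its first germline item in one pass, replacing A's inner scan of germline for every new mutation with a single hash lookup.
import Mathlib
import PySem

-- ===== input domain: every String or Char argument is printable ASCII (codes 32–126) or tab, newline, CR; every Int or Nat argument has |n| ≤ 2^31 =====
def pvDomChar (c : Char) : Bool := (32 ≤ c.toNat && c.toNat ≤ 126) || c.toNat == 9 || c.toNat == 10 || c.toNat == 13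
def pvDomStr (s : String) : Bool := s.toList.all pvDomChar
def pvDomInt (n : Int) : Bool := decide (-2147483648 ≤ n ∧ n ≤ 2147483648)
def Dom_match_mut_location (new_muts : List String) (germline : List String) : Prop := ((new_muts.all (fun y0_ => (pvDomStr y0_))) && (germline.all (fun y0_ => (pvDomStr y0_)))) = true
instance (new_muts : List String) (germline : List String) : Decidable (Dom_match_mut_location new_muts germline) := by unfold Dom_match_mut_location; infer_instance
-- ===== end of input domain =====

-- B replaces A's inner scan of germline per new mutation with a dict (location → first
-- germline item) built once, then a single lookup per new mutation: asymptotically faster.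
-- Return value: a Python set (order-insensitive); the Lean ports agree as lists too.

-- ===== PORT A =====
-- inner 'for i in germline: … break' loop of A
def pvAInner (nmut_loc : String) (ms : PySem.Set String) : List String → PySem.Set String
  | [] => ms
  | i :: rest =>
    if PySem.Str.slice i (some 1) (some (-1)) == nmut_loc then PySem.Set.add ms i
    else pvAInner nmut_loc ms rest

def match_mut_location (new_muts : List String) (germline : List String) : List String :=
  new_muts.foldl
    (fun ms nmut => pvAInner (PySem.Str.slice nmut (some 1) (some (-1))) ms germline)
    PySem.Set.empty

-- ===== PORT B =====
-- first loop of B: first_by_loc[loc] = first germline item with that location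
def pvBIndex (germline : List String) : PySem.Dict String String :=
  germline.foldl
    (fun d g =>
      let loc := PySem.Str.slice g (some 1) (some (-1))
      if d.contains loc then d else d.insert loc g)
    PySem.Dict.empty

def match_mut_location_alt (new_muts : List String) (germline : List String) : List String :=
  let first_by_loc := pvBIndex germline
  new_muts.foldl
    (fun ms nmut =>
      match first_by_loc.get? (PySem.Str.slice nmut (some 1) (some (-1))) with
      | some g => PySem.Set.add ms g
      | none => ms)
    PySem.Set.empty

-- ===== PRECONDITION & SPEC =====
def Spec_match_mut_location (new_muts : List String) (germline : List String) (out : List String) : Prop := out = match_mut_location_alt new_muts germline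
instance (new_muts : List String) (germline : List String) (out : List String) : Decidable (Spec_match_mut_location new_muts germline out) := by unfold Spec_match_mut_location; infer_instance

-- ===== CLAIM (what is proved, stated in full; the proofs are below) =====
def Claim_equal_match_mut_location : Prop := ∀ (new_muts : List String) (germline : List String), Dom_match_mut_location new_muts germline → Spec_match_mut_location new_muts germline (match_mut_location new_muts germline)

-- ===== LEMMAS AND PROOFS =====

-- A's inner loop is "add the first matching germline item, if any"
theorem pvAInner_eq_find (nloc : String) (m : PySem.Set String) (gs : List String) :
    pvAInner nloc m gs =
      match gs.find? (fun g => PySem.Str.slice g (some 1) (some (-1)) == nloc) with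
      | some g => PySem.Set.add m g
      | none => m := by
  induction gs with
  | nil => rfl
  | cons g rest ih =>
    by_cases h : PySem.Str.slice g (some 1) (some (-1)) == nloc
    · simp [pvAInner, List.find?, h]
    · simp only [Bool.not_eq_true] at h
      simp [pvAInner, List.find?, h, ih]

-- B's index dict looks up to the first matching germline item
theorem pvBIndex_get?_aux (gs : List String) :
    ∀ (d : PySem.Dict String String) (loc : String),
    (gs.foldl
      (fun d g =>
        let loc := PySem.Str.slice g (some 1) (some (-1))
        if d.contains loc then d else d.insert loc g) d).get? loc =
    (d.get? loc).or (gs.find? (fun g => PySem.Str.slice g (some 1) (some (-1)) == loc)) := by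
  induction gs with
  | nil => intro d loc; simp
  | cons g rest ih =>
    intro d loc
    simp only [List.foldl_cons]
    rw [ih]
    by_cases hm : PySem.Str.slice g (some 1) (some (-1)) = loc
    · subst hm
      rw [List.find?_cons_of_pos (h := by simp)]
      by_cases hc : d.contains (PySem.Str.slice g (some 1) (some (-1))) = true
      · have hv := hc
        rw [PySem.Dict.contains_eq_isSome_get?] at hv
        obtain ⟨v, hv⟩ := Option.isSome_iff_exists.mp hv
        simp [hc, hv, Option.or]
      · have hnone : d.get? (PySem.Str.slice g (some 1) (some (-1))) = none := by
          apply Option.not_isSome_iff_eq_none.mp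
          rw [← PySem.Dict.contains_eq_isSome_get?]
          simpa using hc
        rw [if_neg hc, PySem.Dict.get?_insert_self, hnone]
        simp [Option.or]
    · rw [List.find?_cons_of_neg (h := by simpa using hm)]
      by_cases hc : d.contains (PySem.Str.slice g (some 1) (some (-1))) = true
      · rw [if_pos hc]
      · rw [if_neg hc, PySem.Dict.get?_insert_of_ne _ _ (fun h => hm h.symm)]

theorem pvBIndex_get? (germline : List String) (loc : String) :
    (pvBIndex germline).get? loc =
      germline.find? (fun g => PySem.Str.slice g (some 1) (some (-1)) == loc) := by
  rw [pvBIndex, pvBIndex_get?_aux]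
  simp [Option.or]

-- ===== VERDICT (by name: the statement is the Claim_ definition above) =====
theorem match_mut_location_spec : Claim_equal_match_mut_location := by
  intro new_muts germline _
  unfold Spec_match_mut_location match_mut_location match_mut_location_alt
  simp only [pvAInner_eq_find, pvBIndex_get?]
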